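-- pv_equiv track=rewrite | github.com/atorang/replication-origin | bioinformatics1.py | Motif
-- ===== SOURCE A (Python) =====
-- def HammingDistance(p,q):
--     #The number of mismatches between strings p and q is called the Hamming distance between these strings
--     count = 0
--     for i in range(len(p)):
--         if p[i]!=q[i]:
--             count+=1
--     return count
--
-- def D_Pattern_Text(Pattern,Text):
--     k=len(Pattern)
--     D = []
--     for j in range(len(Text)-k+1):
--         D.append(HammingDistance(Pattern,Text[j:j+k]))
--     distance=min(D)
--     return distance
--
-- def Motif(Pattern, Text):
--     k = len(Pattern)
--     distance=D_Pattern_Text(Pattern, Text)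
--     motif=''
--     for j in range(len(Text) - k + 1):
--         if HammingDistance(Pattern, Text[j:j + k])==distance:
--             motif=Text[j:j + k]
--             break
--     return motif
-- ===== SOURCE B (Python) =====
-- def HammingDistance(p, q):
--     count = 0
--     for i in range(len(p)):
--         if p[i] != q[i]:
--             count += 1
--     return count
--
--
-- def Motif(Pattern, Text):
--     k = len(Pattern)
--     windows = [Text[j:j + k] for j in range(len(Text) - k + 1)]
--     return min(windows, key=lambda w: HammingDistance(Pattern, w))
-- ===== Notes on version B (the rewrite author's own statement) =====
-- stated objective: simpler
-- what changed: Replaces A's three passes (build the whole distance list, take its min, then rescan all windows for the first one matching it) by one key-based minimum pass over the window list, relying on min's first-minimum rule.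
import Mathlib
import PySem

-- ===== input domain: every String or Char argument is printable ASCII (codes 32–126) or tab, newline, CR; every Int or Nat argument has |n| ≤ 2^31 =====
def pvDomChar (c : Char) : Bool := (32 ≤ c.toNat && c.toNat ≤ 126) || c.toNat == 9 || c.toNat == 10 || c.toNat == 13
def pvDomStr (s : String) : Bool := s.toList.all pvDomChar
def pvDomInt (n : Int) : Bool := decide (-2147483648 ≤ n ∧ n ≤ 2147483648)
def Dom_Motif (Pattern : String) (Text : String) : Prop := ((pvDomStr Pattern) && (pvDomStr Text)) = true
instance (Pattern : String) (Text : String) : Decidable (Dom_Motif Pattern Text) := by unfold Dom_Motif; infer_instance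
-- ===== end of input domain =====

-- B fuses A's three passes (distance list, min, rescan for the first match) into one
-- key-based minimum pass over the window list (objective: simpler).

-- ===== PORT A =====
-- HammingDistance: getD is exact here — i < p.length, and every call site passes q with q.length = p.length
def pyHamming (p q : List Char) : Int :=
  (List.range p.length).foldl (fun count i => if p.getD i ' ' ≠ q.getD i ' ' then count + 1 else count) 0

-- D_Pattern_Text; min([]) (ValueError, when Pattern is longer than Text) is excluded by Pre_Motif
def D_Pattern_Text (p t : List Char) : Int :=
  (PySem.List.min?
    ((List.range (t.length - p.length + 1)).foldl
      (fun acc j => acc ++ [pyHamming p ((t.drop j).take p.length)]) [])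
    (fun x => x)).getD 0

-- the for-loop with break: first window at distance `dist`, motif = '' if none
def motifLoop (p t : List Char) (k : Nat) (dist : Int) : List Nat → List Char
  | [] => []
  | j :: js => if pyHamming p ((t.drop j).take k) = dist then (t.drop j).take k else motifLoop p t k dist js

def Motif (Pattern : String) (Text : String) : String :=
  let p := Pattern.toList
  let t := Text.toList
  let k := p.length
  let distance := D_Pattern_Text p t
  String.ofList (motifLoop p t k distance (List.range (t.length - k + 1)))

-- ===== PORT B =====
def Motif_alt (Pattern : String) (Text : String) : String :=
  let p := Pattern.toList
  let t := Text.toList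
  let windows := (List.range (t.length - p.length + 1)).map (fun j => (t.drop j).take p.length)
  String.ofList ((PySem.List.min? windows (fun w => pyHamming p w)).getD [])

-- ===== PRECONDITION & SPEC =====
-- Pre_: when Pattern is longer than Text there are no windows and Python A (and B) raise ValueError on min([])
def Pre_Motif (Pattern : String) (Text : String) : Prop := Pattern.length ≤ Text.length
instance (Pattern : String) (Text : String) : Decidable (Pre_Motif Pattern Text) := by unfold Pre_Motif; infer_instance
def pvWitness_Motif : String × String := ("AB", "AXBC")

def Spec_Motif (Pattern : String) (Text : String) (out : String) : Prop := out = Motif_alt Pattern Text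
instance (Pattern : String) (Text : String) (out : String) : Decidable (Spec_Motif Pattern Text out) := by unfold Spec_Motif; infer_instance

-- ===== CLAIM (what is proved, stated in full; the proofs are below) =====
def Claim_equal_Motif : Prop := ∀ (Pattern : String) (Text : String), Dom_Motif Pattern Text → Pre_Motif Pattern Text → Spec_Motif Pattern Text (Motif Pattern Text)

-- ===== LEMMAS AND PROOFS =====

-- running first-minimum of a list, seeded with m
def minFrom {α : Type} (key : α → Int) (m : α) (t : List α) : α :=
  t.foldl (fun m x => if key x < key m then x else m) m

theorem minFrom_nil {α : Type} (key : α → Int) (m : α) : minFrom key m [] = m := rfl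

theorem minFrom_cons {α : Type} (key : α → Int) (m x : α) (t : List α) :
    minFrom key m (x :: t) = minFrom key (if key x < key m then x else m) t := rfl

theorem foldl_min?_some {α : Type} (key : α → Int) :
    ∀ (t : List α) (m : α),
      List.foldl (fun acc x => match acc with
        | none => some x
        | some m => if key x < key m then some x else some m) (some m) t = some (minFrom key m t)
  | [], m => rfl
  | x :: t, m => by
    simp only [List.foldl, minFrom_cons]
    by_cases h : key x < key m <;> simp [h, foldl_min?_some key t]

theorem min?_cons {α : Type} (key : α → Int) (a : α) (t : List α) :
    PySem.List.min? (a :: t) key = some (minFrom key a t) := by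
  show List.foldl _ (some a) t = _
  exact foldl_min?_some key t a

theorem key_minFrom_le {α : Type} (key : α → Int) :
    ∀ (t : List α) (m : α), key (minFrom key m t) ≤ key m
  | [], m => le_refl _
  | x :: t, m => by
    rw [minFrom_cons]
    by_cases h : key x < key m
    · simp only [h, if_pos]
      exact le_of_lt (lt_of_le_of_lt (key_minFrom_le key t x) h)
    · simp only [h, if_neg, not_false_iff]
      exact key_minFrom_le key t m

theorem minFrom_map {α : Type} (key : α → Int) :
    ∀ (t : List α) (m : α), minFrom (fun x => x) (key m) (t.map key) = key (minFrom key m t)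
  | [], m => rfl
  | x :: t, m => by
    simp only [List.map, minFrom_cons]
    by_cases h : key x < key m <;> simp [h, minFrom_map key t]

theorem minFrom_eq_self {α : Type} (key : α → Int) :
    ∀ (t : List α) (m : α), key (minFrom key m t) = key m → minFrom key m t = m
  | [], m, _ => rfl
  | x :: t, m, h => by
    rw [minFrom_cons] at h ⊢
    by_cases hx : key x < key m
    · exfalso
      rw [if_pos hx] at h
      have := key_minFrom_le key t x
      omega
    · rw [if_neg hx] at h ⊢
      exact minFrom_eq_self key t m h

theorem find?_minFrom {α : Type} (key : α → Int) (d : α) :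
    ∀ (t : List α) (a : α),
      (((a :: t).find? (fun y => key y == key (minFrom key a t))).getD d) = minFrom key a t
  | [], a => by simp [minFrom_nil, List.find?]
  | x :: t, a => by
    by_cases h : key a = key (minFrom key a (x :: t))
    · have := minFrom_eq_self key (x :: t) a h.symm
      rw [this]
      simp [List.find?]
    · rw [List.find?_cons_of_neg (by simpa using h)]
      rw [minFrom_cons] at h ⊢
      by_cases hx : key x < key a
      · rw [if_pos hx] at h ⊢
        exact find?_minFrom key d t x
      · rw [if_neg hx] at h ⊢
        have hxne : ¬ (key x = key (minFrom key a t)) := by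
          have := key_minFrom_le key t a
          omega
        have ih := find?_minFrom key d t a
        rw [List.find?_cons_of_neg (by simpa using hxne)]
        rw [List.find?_cons_of_neg (by simpa using h)] at ih
        exact ih

theorem motifLoop_eq_find (p t : List Char) (k : Nat) (dist : Int) :
    ∀ js : List Nat,
      motifLoop p t k dist js
        = ((js.map (fun j => (t.drop j).take k)).find? (fun w => pyHamming p w == dist)).getD []
  | [] => rfl
  | j :: js => by
    by_cases h : pyHamming p ((t.drop j).take k) = dist
    · simp [motifLoop, h]
    · simp [motifLoop, h, motifLoop_eq_find p t k dist js]

-- ===== VERDICT (by name: the statement is the Claim_ definition above) =====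
theorem Motif_spec : Claim_equal_Motif := by
  intro Pattern Text _hdom _hpre
  unfold Spec_Motif Motif Motif_alt
  simp only []
  set p := Pattern.toList with hp
  set t := Text.toList with ht
  set k := p.length with hk
  set key : List Char → Int := fun w => pyHamming p w with hkey
  -- the index range is never empty in the Lean port (Nat subtraction), so the window list is a cons
  obtain ⟨n, hn⟩ : ∃ n, t.length - k + 1 = n + 1 := ⟨t.length - k, rfl⟩
  have hrange : List.range (t.length - k + 1) = 0 :: (List.range n).map Nat.succ := by
    rw [hn, List.range_succ_eq_map]
  set ws := (List.range (t.length - k + 1)).map (fun j => (t.drop j).take k) with hws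
  obtain ⟨w0, wrest, hcons⟩ : ∃ w0 wrest, ws = w0 :: wrest := by
    rw [hws, hrange]; exact ⟨_, _, rfl⟩
  -- A's distance list is ws.map key, and distance = key (minFrom key w0 wrest)
  have hD : D_Pattern_Text p t = key (minFrom key w0 wrest) := by
    unfold D_Pattern_Text
    rw [PySem.List.foldl_append_singleton_eq_map, List.nil_append,
      show (fun j => pyHamming p ((t.drop j).take k)) = key ∘ (fun j => (t.drop j).take k) from rfl,
      ← List.map_map, ← hws, hcons, List.map_cons, min?_cons, minFrom_map]
    rfl
  -- A's search loop returns the first window whose key equals that minimum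
  have hA : motifLoop p t k (D_Pattern_Text p t) (List.range (t.length - k + 1))
      = minFrom key w0 wrest := by
    rw [motifLoop_eq_find, ← hws, hcons, hD]
    exact find?_minFrom key [] wrest w0
  rw [hA, hcons, min?_cons]
  rfl
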